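-- pv_equiv track=rewrite | github.com/Jacqkues/Finale_databattle2025 | backend/data/questions/extraction_qcm_EQE.py | clean_questions
-- ===== SOURCE A (Python) =====
-- def clean_questions(data):
--     for item in data.get("content", []):
--         if "Jan Feb" in item["question"]:
--             item["question"] = item["question"].split("Jan Feb")[0].strip()
--         if "JANUARY FEBRUARY MARCH" in item["question"]:
--             item["question"] = item["question"].split("JANUARY FEBRUARY MARCH")[0].strip()
--
--     data["content"] = [item for item in data.get("content", []) if item["question"] != "For"]
--
--     return data
-- ===== SOURCE B (Python) =====
-- _MARKERS = ("Jan Feb", "JANUARY FEBRUARY MARCH")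
--
-- def _cut_at_first_marker(q):
--     # single scan: find the earliest occurrence of any sentinel marker,
--     # truncate there once and strip once (vs sequential per-marker split+strip)
--     cut = -1
--     for m in _MARKERS:
--         i = q.find(m)
--         if i != -1 and (cut == -1 or i < cut):
--             cut = i
--     return q[:cut].strip() if cut != -1 else q
--
-- def clean_questions(data):
--     new_content = []
--     for item in data.get("content", []):
--         q = _cut_at_first_marker(item["question"])
--         if q != "For":
--             new_content.append(dict(item, question=q))
--     data["content"] = new_content
--     return data
-- ===== Notes on version B (the rewrite author's own statement) =====
-- stated objective: alternative
-- what changed: Per question, A does two sequential conditional passes (split on 'Jan Feb', strip, then split on 'JANUARY FEBRUARY MARCH', strip); B instead finds the earliest occurrence of either sentinel in one scan, truncates once and strips once, and builds the filtered content list in a single pass without mutating the items; equivalence needs the fact that the two markers cannot overlap or re-create each other. Pre_ excludes items without a 'question' key (A raises KeyError) and assoc lists with duplicate keys inside an item, which do not represent any Python dict.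
import Mathlib
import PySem

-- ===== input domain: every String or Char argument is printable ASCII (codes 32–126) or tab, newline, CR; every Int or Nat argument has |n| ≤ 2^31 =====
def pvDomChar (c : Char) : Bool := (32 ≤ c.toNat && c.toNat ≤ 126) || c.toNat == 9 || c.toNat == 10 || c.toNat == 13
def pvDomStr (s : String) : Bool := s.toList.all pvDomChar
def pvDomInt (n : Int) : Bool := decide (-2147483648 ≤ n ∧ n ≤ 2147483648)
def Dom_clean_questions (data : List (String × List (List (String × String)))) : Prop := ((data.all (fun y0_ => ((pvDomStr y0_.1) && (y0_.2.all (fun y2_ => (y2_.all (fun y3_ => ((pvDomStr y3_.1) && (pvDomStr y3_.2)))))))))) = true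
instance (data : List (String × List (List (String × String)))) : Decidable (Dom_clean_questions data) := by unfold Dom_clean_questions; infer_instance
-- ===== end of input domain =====

-- B replaces A's two sequential conditional split-and-strip passes per question by a single scan
-- for the earliest occurrence of either sentinel marker, one truncation and one strip, and builds
-- the filtered content list in one pass (return-value equivalence: A mutates the item dicts in
-- place, B leaves them untouched and builds fresh items).

-- ===== PORT A =====
-- item["question"] (shared trivial helper; Pre_ guarantees the key is present)
def pvQget (item : List (String × String)) : String :=
  (PySem.Dict.mk item).getD "question" ""

-- body of A's for-loop: the two conditional in-place truncations of item["question"]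
def pvCleanItemA (item : List (String × String)) : List (String × String) :=
  let item := if PySem.Str.isIn "Jan Feb" (pvQget item)
    then ((PySem.Dict.mk item).insert "question"
            (PySem.Str.strip (((PySem.Str.split? (pvQget item) "Jan Feb").getD []).headD ""))).items
    else item
  let item := if PySem.Str.isIn "JANUARY FEBRUARY MARCH" (pvQget item)
    then ((PySem.Dict.mk item).insert "question"
            (PySem.Str.strip (((PySem.Str.split? (pvQget item) "JANUARY FEBRUARY MARCH").getD []).headD ""))).items
    else item
  item

def clean_questions (data : List (String × List (List (String × String)))) : List (String × List (List (String × String))) :=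
  let content := (PySem.Dict.mk data).getD "content" []
  let content := content.map pvCleanItemA
  let filtered := content.filter (fun item => pvQget item != "For")
  ((PySem.Dict.mk data).insert "content" filtered).items

-- ===== PORT B =====
-- Source B's _cut_at_first_marker: one scan over the markers for the earliest occurrence, then
-- a single truncation and strip
def pvFindCut (q : String) : Int :=
  ["Jan Feb", "JANUARY FEBRUARY MARCH"].foldl (fun cut m =>
    let i := PySem.Str.find q m
    if i ≠ -1 ∧ (cut = -1 ∨ i < cut) then i else cut) (-1)

def pvCleanQB (q : String) : String :=
  let cut := pvFindCut q
  if cut ≠ -1 then PySem.Str.strip (PySem.Str.slice q none (some cut)) else q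

def clean_questions_alt (data : List (String × List (List (String × String)))) : List (String × List (List (String × String))) :=
  let newContent := ((PySem.Dict.mk data).getD "content" []).foldl (fun acc item =>
      let q := pvCleanQB (pvQget item)
      if q != "For"
        then acc ++ [((PySem.Dict.mk item).insert "question" q).items]
        else acc) []
  ((PySem.Dict.mk data).insert "content" newContent).items

-- ===== PRECONDITION & SPEC =====
-- Pre_ excludes content items without a "question" key (A raises KeyError there) and assoc
-- lists with duplicate keys inside an item, which do not represent any Python dict.
def Pre_clean_questions (data : List (String × List (List (String × String)))) : Prop :=
  ∀ item ∈ (PySem.Dict.mk data).getD "content" [],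
    (PySem.Dict.mk item).contains "question" = true ∧ (item.map Prod.fst).Nodup
instance (data : List (String × List (List (String × String)))) : Decidable (Pre_clean_questions data) := by unfold Pre_clean_questions; infer_instance
def pvWitness_clean_questions : (List (String × List (List (String × String)))) :=
  [("content", [[("question", "For Jan Feb x")], [("question", "ok"), ("id", "3")]])]
def Spec_clean_questions (data : List (String × List (List (String × String)))) (out : List (String × List (List (String × String)))) : Prop := out = clean_questions_alt data
instance (data : List (String × List (List (String × String)))) (out : List (String × List (List (String × String)))) : Decidable (Spec_clean_questions data out) := by unfold Spec_clean_questions; infer_instance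

-- ===== CLAIM (what is proved, stated in full; the proofs are below) =====
def Claim_equal_clean_questions : Prop := ∀ (data : List (String × List (List (String × String)))), Dom_clean_questions data → Pre_clean_questions data → Spec_clean_questions data (clean_questions data)

-- ===== LEMMAS AND PROOFS =====

-- A's per-question cleaning, as a value-level function (two sequential conditional split+strip)
def pvTwoStep (q : String) : String :=
  let q := if PySem.Str.isIn "Jan Feb" q
    then PySem.Str.strip (((PySem.Str.split? q "Jan Feb").getD []).headD "") else q
  let q := if PySem.Str.isIn "JANUARY FEBRUARY MARCH" q
    then PySem.Str.strip (((PySem.Str.split? q "JANUARY FEBRUARY MARCH").getD []).headD "") else q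
  q

-- ---- dict-level lemmas (A's in-place writes vs fresh values) ----

-- writing back the value the (unique, present) key already has is the identity on the item list
theorem insert_getD_self_of_nodup (item : List (String × String)) (k : String) (d : String)
    (hc : (PySem.Dict.mk item).contains k = true) (hnd : (item.map Prod.fst).Nodup) :
    ((PySem.Dict.mk item).insert k ((PySem.Dict.mk item).getD k d)).items = item := by
  induction item with
  | nil => simp [PySem.Dict.contains] at hc
  | cons p rest ih =>
    obtain ⟨k0, v0⟩ := p
    simp only [List.map_cons, List.nodup_cons] at hnd
    by_cases h : k0 = k
    · subst h
      have hrest : ∀ q ∈ rest, (q.1 == k0) = false := by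
        intro q hq
        simp only [beq_eq_false_iff_ne, ne_eq]
        intro he; exact hnd.1 (he ▸ List.mem_map_of_mem hq)
      have hmap : List.map (fun q => if q.1 = k0 then (k0, v0) else q) rest = rest := by
        refine (List.map_congr_left ?_).trans (List.map_id' rest)
        intro q hq
        have := hrest q hq; simp only [beq_eq_false_iff_ne, ne_eq] at this
        simp [this]
      simp [PySem.Dict.insert, PySem.Dict.contains, PySem.Dict.getD, PySem.Dict.get?,
        List.find?, hmap]
    · have hk : (k0 == k) = false := by simp [h]
      have hc' : (PySem.Dict.mk rest).contains k = true := by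
        simpa [PySem.Dict.contains, hk] using hc
      have hrec := ih hc' hnd.2
      have hany : (rest.any fun p => p.1 == k) = true := by
        simpa [PySem.Dict.contains] using hc'
      simp [PySem.Dict.insert, PySem.Dict.contains, PySem.Dict.getD, PySem.Dict.get?,
        List.find?, hk, h, hany] at hrec ⊢
      exact hrec

theorem qget_insert (d : PySem.Dict String String) (v : String) :
    pvQget ((d.insert "question" v).items) = v := by
  show (PySem.Dict.mk (d.insert "question" v).items).getD "question" "" = v
  rw [show PySem.Dict.mk (d.insert "question" v).items = d.insert "question" v from rfl]
  exact PySem.Dict.getD_insert_self d "question" v ""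

-- one conditional in-place truncation, rephrased as an unconditional write of the cleaned value
theorem step_eq (item : List (String × String)) (k : String)
    (hc : (PySem.Dict.mk item).contains k = true) (hnd : (item.map Prod.fst).Nodup)
    (c : Bool) (v : String) :
    (if c = true then ((PySem.Dict.mk item).insert k v).items else item)
      = ((PySem.Dict.mk item).insert k
          (if c = true then v else (PySem.Dict.mk item).getD k "")).items := by
  cases c with
  | true => simp
  | false => simpa using (insert_getD_self_of_nodup item k "" hc hnd).symm

-- A's loop body = writing A's cleaned question value into the item
theorem cleanA_eq (item : List (String × String))
    (hc : (PySem.Dict.mk item).contains "question" = true) (hnd : (item.map Prod.fst).Nodup) :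
    pvCleanItemA item = ((PySem.Dict.mk item).insert "question" (pvTwoStep (pvQget item))).items := by
  have hnd1 : ∀ v : String,
      (((PySem.Dict.mk item).insert "question" v).items.map Prod.fst).Nodup := by
    intro v
    have := PySem.Dict.nodup_keys_insert (d := PySem.Dict.mk item) (k := "question") (v := v)
      (by simpa [PySem.Dict.keys] using hnd)
    simpa [PySem.Dict.keys] using this
  simp only [pvCleanItemA, pvTwoStep]
  rw [step_eq item "question" hc hnd]
  rw [qget_insert]
  rw [step_eq _ "question" (by
        rw [show PySem.Dict.mk ((PySem.Dict.mk item).insert "question" _).items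
              = (PySem.Dict.mk item).insert "question" _ from rfl]
        exact PySem.Dict.contains_insert_self _ _ _) (hnd1 _)]
  rw [show PySem.Dict.mk ((PySem.Dict.mk item).insert "question" _).items
        = (PySem.Dict.mk item).insert "question" _ from rfl]
  rw [PySem.Dict.insert_insert_self, PySem.Dict.getD_insert_self]
  rfl

-- ---- char-level versions of the two cleaners ----

def csM1 : List Char := "Jan Feb".toList
def csM2 : List Char := "JANUARY FEBRUARY MARCH".toList

def csStep (m S : List Char) : List Char :=
  if PySem.Chars.isIn m S then PySem.Chars.strip ((PySem.Chars.splitOn S m).headD []) else S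

def csCut (S : List Char) : Int :=
  [csM1, csM2].foldl (fun cut m =>
    let i := PySem.Chars.find S m
    if i ≠ -1 ∧ (cut = -1 ∨ i < cut) then i else cut) (-1)

def csMin (S : List Char) : List Char :=
  let cut := csCut S
  if cut ≠ -1 then PySem.Chars.strip (PySem.Chars.slice S none (some cut)) else S

theorem headD_map_ofList (l : List (List Char)) :
    ((l.map String.ofList).headD "").toList = l.headD [] := by
  cases l with
  | nil => rfl
  | cons a t => simp [String.toList_ofList]

theorem toList_stepStr (m q : String) (hm : m.toList ≠ []) :
    (if PySem.Str.isIn m q then PySem.Str.strip (((PySem.Str.split? q m).getD []).headD "") else q).toList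
      = csStep m.toList q.toList := by
  have hsplit : PySem.Str.split? q m
      = some ((PySem.Chars.splitOn q.toList m.toList).map String.ofList) := by
    simp [PySem.Str.split?, PySem.Chars.split?, List.isEmpty_iff, hm]
  by_cases h : PySem.Str.isIn m q = true
  · have h' : PySem.Chars.isIn m.toList q.toList = true := by
      rw [← PySem.Str.isIn_eq]; exact h
    simp only [csStep, h, h', if_true, hsplit, Option.getD_some]
    rw [PySem.Str.toList_strip, headD_map_ofList]
  · have h' : ¬ PySem.Chars.isIn m.toList q.toList = true := by
      rw [← PySem.Str.isIn_eq]; exact h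
    simp [csStep, h']

theorem toList_twoStep (q : String) :
    (pvTwoStep q).toList = csStep csM2 (csStep csM1 q.toList) := by
  show (if PySem.Str.isIn "JANUARY FEBRUARY MARCH"
          (if PySem.Str.isIn "Jan Feb" q
            then PySem.Str.strip (((PySem.Str.split? q "Jan Feb").getD []).headD "") else q)
        then PySem.Str.strip (((PySem.Str.split?
          (if PySem.Str.isIn "Jan Feb" q
            then PySem.Str.strip (((PySem.Str.split? q "Jan Feb").getD []).headD "") else q)
          "JANUARY FEBRUARY MARCH").getD []).headD "")
        else (if PySem.Str.isIn "Jan Feb" q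
            then PySem.Str.strip (((PySem.Str.split? q "Jan Feb").getD []).headD "") else q)).toList
      = csStep csM2 (csStep csM1 q.toList)
  rw [toList_stepStr "JANUARY FEBRUARY MARCH" _ (by decide)]
  rw [toList_stepStr "Jan Feb" q (by decide)]
  rfl

theorem toList_cleanQB (q : String) : (pvCleanQB q).toList = csMin q.toList := by
  have hc : pvFindCut q = csCut q.toList := by
    simp [pvFindCut, csCut, PySem.Str.find_eq, csM1, csM2]
  by_cases h : csCut q.toList ≠ -1
  · simp [pvCleanQB, csMin, hc, h, PySem.Str.toList_strip, PySem.Str.toList_slice,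
      PySem.Chars.slice]
  · simp [pvCleanQB, csMin, hc, h]

-- ---- generic list facts specialised to our proof ----

theorem take_eq_of_prefix {α : Type} {y x : List α} (h : y <+: x) {n : Nat}
    (hn : n ≤ y.length) : x.take n = y.take n := by
  obtain ⟨z, rfl⟩ := h
  rw [List.take_append, Nat.sub_eq_zero_of_le hn]
  simp

theorem prefix_into_take {α : Type} {y x : List α} (h : y <+: x) {n : Nat}
    (hn : y.length ≤ n) : y <+: x.take n := by
  obtain ⟨z, rfl⟩ := h
  rw [List.take_append, List.take_of_length_le hn]
  exact List.prefix_append _ _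

theorem prefix_of_take_prefix {α : Type} {y x : List α} {n : Nat}
    (h : y <+: x.take n) : y <+: x := h.trans (List.take_prefix n x)

theorem rstrip_prefix (x : List Char) : PySem.Chars.rstrip x <+: x := by
  rw [← List.reverse_suffix]
  simpa [PySem.Chars.rstrip] using
    List.dropWhile_suffix (l := x.reverse) PySem.Chars.isspace

theorem strip_infix (x : List Char) : PySem.Chars.strip x <:+: x := by
  have h1 : PySem.Chars.strip x <+: PySem.Chars.lstrip x := rstrip_prefix _
  have h2 : PySem.Chars.lstrip x <:+ x := List.dropWhile_suffix _
  exact h1.isInfix.trans h2.isInfix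

theorem rstrip_append (u v : List Char)
    (hv : v.reverse.dropWhile PySem.Chars.isspace ≠ []) :
    PySem.Chars.rstrip (u ++ v) = u ++ PySem.Chars.rstrip v := by
  simp only [PySem.Chars.rstrip, List.reverse_append, List.dropWhile_append,
    List.isEmpty_iff, hv, if_false]
  simp

theorem head_dropWhile_false {p : Char → Bool} {l : List Char} {c : Char} {cs : List Char}
    (h : l.dropWhile p = c :: cs) : p c = false := by
  induction l with
  | nil => simp at h
  | cons a t ih =>
    by_cases hp : p a
    · rw [List.dropWhile_cons_of_pos hp] at h; exact ih h
    · rw [List.dropWhile_cons_of_neg hp] at h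
      cases h; simpa using hp

theorem dropWhile_take_dropWhile (p : Char → Bool) (x : List Char) (n : Nat) :
    (List.take n (x.dropWhile p)).dropWhile p = List.take n (x.dropWhile p) := by
  cases hc : List.take n (x.dropWhile p) with
  | nil => simp
  | cons c cs =>
    have hx : x.dropWhile p = c :: (x.dropWhile p).tail := by
      have := List.take_prefix n (x.dropWhile p)
      rw [hc] at this
      obtain ⟨z, hz⟩ := this
      rw [← hz]; rfl
    have hpc := head_dropWhile_false hx
    rw [List.dropWhile_cons_of_neg (by simp [hpc])]

-- ---- the head of splitOn: everything before the first occurrence of the separator ----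

theorem splitOn_go_headD_push (sep : List Char) :
    ∀ (fuel : Nat) (S cur : List Char) (acc : List (List Char)) (a : List Char),
      (PySem.Chars.splitOn.go sep fuel S cur (acc ++ [a])).headD [] = a := by
  intro fuel
  induction fuel with
  | zero => intro S cur acc a; simp [PySem.Chars.splitOn.go]
  | succ n ih =>
    intro S cur acc a
    cases S with
    | nil => simp [PySem.Chars.splitOn.go]
    | cons c rest =>
      simp only [PySem.Chars.splitOn.go]
      by_cases hp : sep.isPrefixOf (c :: rest) = true
      · rw [if_pos hp]
        have hacc : cur.reverse :: (acc ++ [a]) = (cur.reverse :: acc) ++ [a] := rfl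
        rw [hacc]
        exact ih _ _ _ _
      · rw [if_neg hp]
        exact ih _ _ _ _

theorem splitOn_go_headD (sep : List Char) (hsep : sep ≠ []) :
    ∀ (fuel : Nat) (S cur : List Char) (j : Nat), S.length < fuel →
      sep <+: S.drop j → (∀ i < j, ¬ sep <+: S.drop i) →
      (PySem.Chars.splitOn.go sep fuel S cur []).headD [] = cur.reverse ++ S.take j := by
  intro fuel
  induction fuel with
  | zero => intro S cur j hlen _ _; omega
  | succ n ih =>
    intro S cur j hlen hj hmin
    cases S with
    | nil =>
      exact absurd (List.prefix_nil.mp (by simpa using hj)) hsep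
    | cons c rest =>
      simp only [PySem.Chars.splitOn.go]
      by_cases hp : sep.isPrefixOf (c :: rest) = true
      · have hj0 : j = 0 := by
          by_contra h0
          exact hmin 0 (Nat.pos_of_ne_zero h0)
            (by simpa using List.isPrefixOf_iff_prefix.mp hp)
        rw [if_pos hp]
        have hpush := splitOn_go_headD_push sep n (List.drop sep.length (c :: rest)) []
          [] cur.reverse
        simp only [List.nil_append] at hpush
        rw [hpush, hj0]
        simp
      · rw [if_neg hp]
        have hj0 : j ≠ 0 := by
          intro h0; subst h0
          exact hp (List.isPrefixOf_iff_prefix.mpr (by simpa using hj))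
        obtain ⟨j', rfl⟩ : ∃ j', j = j' + 1 := ⟨j - 1, by omega⟩
        have h1 : sep <+: rest.drop j' := by simpa using hj
        have h2 : ∀ i < j', ¬ sep <+: rest.drop i := by
          intro i hi
          have := hmin (i + 1) (by omega)
          simpa using this
        rw [ih rest (c :: cur) j' (by simpa using Nat.lt_of_succ_lt_succ hlen) h1 h2]
        simp

theorem splitOn_headD (sep S : List Char) (j : Nat) (hsep : sep ≠ [])
    (hj : sep <+: S.drop j) (hmin : ∀ i < j, ¬ sep <+: S.drop i) :
    (PySem.Chars.splitOn S sep).headD [] = S.take j := by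
  have := splitOn_go_headD sep hsep (S.length + 1) S [] j (by omega) hj hmin
  simpa [PySem.Chars.splitOn] using this

-- csStep when the marker occurs first at j
theorem csStep_fires (m S : List Char) (j : Nat) (hm : m ≠ [])
    (hj : m <+: S.drop j) (hmin : ∀ i < j, ¬ m <+: S.drop i) :
    csStep m S = PySem.Chars.strip (S.take j) := by
  have hin : PySem.Chars.isIn m S = true :=
    (PySem.Chars.exists_prefix_drop_iff_isIn m S).mp ⟨j, hj⟩
  rw [csStep, if_pos hin, splitOn_headD m S j hm hj hmin]

theorem csStep_skips (m S : List Char) (h : ¬ PySem.Chars.isIn m S = true) :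
    csStep m S = S := by
  rw [csStep, if_neg h]

-- marker disjointness: no nonempty suffix of "JANUARY FEBRUARY MARCH" is prefix-comparable
-- with "Jan Feb"
theorem overlapTab : ∀ t : Nat, t < 22 →
    ¬ (csM1 <+: csM2.drop t) ∧ ¬ (csM2.drop t <+: csM1) := by decide

-- ---- the main char-level theorem: two sequential split+strip passes = one earliest cut ----

theorem csCut_unfold (S : List Char) :
    csCut S = if PySem.Chars.find S csM2 ≠ -1 ∧
        (PySem.Chars.find S csM1 = -1 ∨ PySem.Chars.find S csM2 < PySem.Chars.find S csM1)
      then PySem.Chars.find S csM2 else PySem.Chars.find S csM1 := by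
  simp only [csCut, List.foldl]
  by_cases h : PySem.Chars.find S csM1 = -1
  · simp [h]
  · simp [h]

theorem csMin_fires (S : List Char) {f : Int} (hcut : csCut S = f) (hf : 0 ≤ f) :
    csMin S = PySem.Chars.strip (S.take f.toNat) := by
  have hne : f ≠ -1 := by omega
  simp only [csMin, hcut, hne, ne_eq, not_false_eq_true, if_true]
  congr 1
  show PySem.List.slice S none (some f) = S.take f.toNat
  exact PySem.List.slice_to S hf

theorem csTwo_eq_csMin (S : List Char) : csStep csM2 (csStep csM1 S) = csMin S := by
  have hM1ne : csM1 ≠ [] := by decide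
  have hM2ne : csM2 ≠ [] := by decide
  have hM2len : csM2.length = 22 := by decide
  by_cases h1 : PySem.Chars.isIn csM1 S = true
  case neg =>
    have hf1 : PySem.Chars.find S csM1 = -1 :=
      (PySem.Chars.find_eq_neg_one_iff S csM1).mpr
        (fun hinf => h1 ((PySem.Chars.isIn_iff_infix _ _).mpr hinf))
    rw [csStep_skips csM1 S h1]
    by_cases h2 : PySem.Chars.isIn csM2 S = true
    · -- only the long marker occurs
      have hnn2 : 0 ≤ PySem.Chars.find S csM2 :=
        (PySem.Chars.find_nonneg_iff S csM2).mpr ((PySem.Chars.isIn_iff_infix _ _).mp h2)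
      obtain ⟨hp2, hm2⟩ := PySem.Chars.find_spec hnn2
      rw [csStep_fires csM2 S _ hM2ne hp2 hm2]
      rw [csMin_fires S (f := PySem.Chars.find S csM2) ?hc hnn2]
      case hc =>
        rw [csCut_unfold, if_pos ⟨by omega, Or.inl hf1⟩]
    · -- neither marker occurs
      have hf2 : PySem.Chars.find S csM2 = -1 :=
        (PySem.Chars.find_eq_neg_one_iff S csM2).mpr
          (fun hinf => h2 ((PySem.Chars.isIn_iff_infix _ _).mpr hinf))
      rw [csStep_skips csM2 S h2]
      have hcut : csCut S = -1 := by
        rw [csCut_unfold, hf1, hf2]; simp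
      simp [csMin, hcut]
  case pos =>
    have hnn1 : 0 ≤ PySem.Chars.find S csM1 :=
      (PySem.Chars.find_nonneg_iff S csM1).mpr ((PySem.Chars.isIn_iff_infix _ _).mp h1)
    obtain ⟨hp1, hm1⟩ := PySem.Chars.find_spec hnn1
    set j1 := (PySem.Chars.find S csM1).toNat with hj1def
    have hf1 : PySem.Chars.find S csM1 = (j1 : Int) := (Int.toNat_of_nonneg hnn1).symm
    rw [csStep_fires csM1 S j1 hM1ne hp1 hm1]
    by_cases h2 : PySem.Chars.isIn csM2 S = true
    case neg =>
      -- only the short marker occurs: the second pass cannot fire on the cleaned prefix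
      have hnotin : ¬ PySem.Chars.isIn csM2 (PySem.Chars.strip (S.take j1)) = true := by
        intro hin
        exact h2 ((PySem.Chars.isIn_iff_infix _ _).mpr
          (((PySem.Chars.isIn_iff_infix _ _).mp hin).trans
            ((strip_infix _).trans (List.take_prefix j1 S).isInfix)))
      rw [csStep_skips csM2 _ hnotin]
      have hf2 : PySem.Chars.find S csM2 = -1 :=
        (PySem.Chars.find_eq_neg_one_iff S csM2).mpr
          (fun hinf => h2 ((PySem.Chars.isIn_iff_infix _ _).mpr hinf))
      rw [csMin_fires S (f := PySem.Chars.find S csM1) ?hc hnn1]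
      case hc =>
        rw [csCut_unfold, if_neg (by omega)]
    case pos =>
      have hnn2 : 0 ≤ PySem.Chars.find S csM2 :=
        (PySem.Chars.find_nonneg_iff S csM2).mpr ((PySem.Chars.isIn_iff_infix _ _).mp h2)
      obtain ⟨hp2, hm2⟩ := PySem.Chars.find_spec hnn2
      set j2 := (PySem.Chars.find S csM2).toNat with hj2def
      have hf2 : PySem.Chars.find S csM2 = (j2 : Int) := (Int.toNat_of_nonneg hnn2).symm
      -- the two first-occurrence indices differ (the markers are not prefix-comparable)
      have hne12 : j1 ≠ j2 := by
        intro he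
        rcases List.prefix_or_prefix_of_prefix hp1 (he ▸ hp2) with h | h
        · exact (overlapTab 0 (by omega)).1 (by simpa using h)
        · exact (overlapTab 0 (by omega)).2 (by simpa using h)
      by_cases hlt : j1 < j2
      · -- short marker first: second pass cannot fire inside the cleaned prefix
        have hnotin : ¬ PySem.Chars.isIn csM2 (PySem.Chars.strip (S.take j1)) = true := by
          intro hin
          have hinf : PySem.Chars.isIn csM2 (S.take j1) = true :=
            (PySem.Chars.isIn_iff_infix _ _).mpr
              (((PySem.Chars.isIn_iff_infix _ _).mp hin).trans (strip_infix _))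
          obtain ⟨i, hi⟩ := (PySem.Chars.exists_prefix_drop_iff_isIn csM2 (S.take j1)).mpr hinf
          rw [List.drop_take] at hi
          have hile : csM2.length ≤ j1 - i := by
            have := hi.length_le
            have h2' := List.length_take (i := j1 - i) (l := S.drop i)
            omega
          exact hm2 i (by omega) (prefix_of_take_prefix hi)
        rw [csStep_skips csM2 _ hnotin]
        rw [csMin_fires S (f := PySem.Chars.find S csM1) ?hc hnn1]
        case hc =>
          rw [csCut_unfold, if_neg (by omega)]
      · -- long marker strictly first: it survives the first cut-and-strip, and the second
        -- pass lands on the same final result as cutting at the long marker directly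
        have hj21 : j2 < j1 := by omega
        -- markers cannot overlap: the long marker lies entirely before the short cut
        have hover : j2 + 22 ≤ j1 := by
          by_contra hno
          have ht : j1 - j2 < 22 := by omega
          have hdrop : csM2.drop (j1 - j2) <+: S.drop j1 := by
            have h := hp2.drop (j1 - j2)
            rwa [List.drop_drop, show j2 + (j1 - j2) = j1 by omega] at h
          rcases List.prefix_or_prefix_of_prefix hp1 hdrop with h | h
          · exact (overlapTab (j1 - j2) ht).1 h
          · exact (overlapTab (j1 - j2) ht).2 h
        set T := S.take j1 with hT
        set W := T.takeWhile PySem.Chars.isspace with hW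
        set R := T.dropWhile PySem.Chars.isspace with hR
        have hWR : W ++ R = T := List.takeWhile_append_dropWhile
        have hM2T : csM2 <+: T.drop j2 := by
          rw [hT, List.drop_take]
          exact prefix_into_take hp2 (by omega)
        have hWle : W.length ≤ j2 := by
          by_contra hgt
          rw [Nat.not_le] at hgt
          have h1' : W.drop j2 <+: T.drop j2 := (List.takeWhile_prefix _).drop j2
          have hWd_ne : W.drop j2 ≠ [] := by
            rw [Ne, List.drop_eq_nil_iff]; omega
          have hhead : (T.drop j2).head? = some 'J' := by
            obtain ⟨z, hz⟩ := hM2T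
            rw [← hz]
            rfl
          have hheadW : (W.drop j2).head? = some 'J' := by
            obtain ⟨z, hz⟩ := h1'
            rw [← hz, List.head?_append] at hhead
            cases hWd : (W.drop j2).head? with
            | none => exact absurd (List.head?_eq_none_iff.mp hWd) hWd_ne
            | some a => rw [hWd] at hhead; simpa using hhead
          have hmem : ('J' : Char) ∈ W :=
            List.mem_of_mem_drop (List.mem_of_mem_head? (Option.mem_def.mpr hheadW))
          have := List.mem_takeWhile_imp (hW ▸ hmem)
          simp [PySem.Chars.isspace] at this
        set n := j2 - W.length with hn
        have hRd : R.drop n = T.drop j2 := by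
          conv_rhs => rw [← hWR]
          rw [List.drop_append, List.drop_eq_nil_iff.mpr (by omega : W.length ≤ j2)]
          simp [hn]
        have hM2R : csM2 <+: R.drop n := hRd ▸ hM2T
        obtain ⟨r, hr⟩ := hM2R
        have hnR : n < R.length := by
          by_contra hge
          have hnil : R.drop n = [] := List.drop_eq_nil_iff.mpr (by omega)
          rw [hnil] at hr
          have := congrArg List.length hr
          simp [hM2len] at this
        have hJ2 : PySem.Chars.isspace 'J' = false := by decide
        have hvne : (csM2 ++ r).reverse.dropWhile PySem.Chars.isspace ≠ [] := by
          intro hnil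
          have := List.dropWhile_eq_nil_iff.mp hnil 'J'
            (by simp [show ('J' : Char) ∈ csM2 by decide])
          rw [hJ2] at this
          exact Bool.false_ne_true this
        have hRsplit : R = R.take n ++ (csM2 ++ r) := by
          conv_lhs => rw [← List.take_append_drop n R, ← hr]
        have hrs : PySem.Chars.rstrip R = R.take n ++ PySem.Chars.rstrip (csM2 ++ r) := by
          conv_lhs => rw [hRsplit]
          exact rstrip_append _ _ hvne
        have hM2rs : csM2 <+: PySem.Chars.rstrip (csM2 ++ r) := by
          by_cases hrr : r.reverse.dropWhile PySem.Chars.isspace = []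
          · have heq : PySem.Chars.rstrip (csM2 ++ r) = csM2 := by
              simp only [PySem.Chars.rstrip, List.reverse_append, List.dropWhile_append, hrr]
              simp
              decide
            rw [heq]
          · rw [rstrip_append _ _ hrr]
            exact List.prefix_append _ _
        have hlen_take : (R.take n).length = n := by
          rw [List.length_take]; omega
        have hocc : csM2 <+: (PySem.Chars.rstrip R).drop n := by
          rw [hrs, List.drop_append]
          have e1 : List.drop n (R.take n) = [] :=
            List.drop_eq_nil_iff.mpr (by rw [List.length_take]; omega)
          rw [e1, hlen_take, Nat.sub_self, List.drop_zero, List.nil_append]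
          exact hM2rs
        have hmin' : ∀ i < n, ¬ csM2 <+: (PySem.Chars.rstrip R).drop i := by
          intro i hi hpre
          have h2' : csM2 <+: R.drop i := hpre.trans ((rstrip_prefix R).drop i)
          have h3 : R.drop i = T.drop (W.length + i) := by
            conv_rhs => rw [← hWR]
            rw [List.drop_append, List.drop_eq_nil_iff.mpr (by omega : W.length ≤ W.length + i)]
            simp [show W.length + i - W.length = i by omega]
          rw [h3, hT, List.drop_take] at h2'
          exact hm2 (W.length + i) (by omega) (prefix_of_take_prefix h2')
        have hstripT : PySem.Chars.strip T = PySem.Chars.rstrip R := rfl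
        rw [hstripT]
        rw [csStep_fires csM2 _ n hM2ne hocc hmin']
        have htk : (PySem.Chars.rstrip R).take n = R.take n := by
          rw [take_eq_of_prefix (rstrip_prefix R)
            (by rw [hrs, List.length_append, hlen_take]; omega)]
        rw [htk]
        have hlstk : PySem.Chars.lstrip (R.take n) = R.take n := by
          rw [hR]
          exact dropWhile_take_dropWhile _ T n
        have hstrip2 : PySem.Chars.strip (R.take n) = PySem.Chars.rstrip (R.take n) := by
          show PySem.Chars.rstrip (PySem.Chars.lstrip (R.take n)) = _
          rw [hlstk]
        rw [hstrip2]
        -- now the B side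
        rw [csMin_fires S (f := PySem.Chars.find S csM2) ?hc hnn2]
        case hc =>
          rw [csCut_unfold, if_pos ⟨by omega, Or.inr (by omega)⟩]
        have hSj2 : S.take j2 = W ++ R.take n := by
          have h1' : S.take j2 = T.take j2 := by
            rw [hT, List.take_take, min_eq_left (le_of_lt hj21)]
          rw [h1']
          conv_lhs => rw [← hWR]
          rw [List.take_append, List.take_of_length_le hWle]
        rw [← hj2def, hSj2]
        have hWall : W.dropWhile PySem.Chars.isspace = [] :=
          List.dropWhile_eq_nil_iff.mpr (fun x hx => List.mem_takeWhile_imp (hW ▸ hx))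
        show _ = PySem.Chars.rstrip (PySem.Chars.lstrip (W ++ R.take n))
        have hls : PySem.Chars.lstrip (W ++ R.take n) = R.take n := by
          show (W ++ R.take n).dropWhile PySem.Chars.isspace = R.take n
          rw [List.dropWhile_append, hWall]
          simp only [List.isEmpty_nil, if_true]
          exact hlstk
        rw [hls]

-- ---- assembling ----

theorem twostep_eq (q : String) : pvTwoStep q = pvCleanQB q := by
  rw [← String.toList_inj, toList_twoStep, toList_cleanQB, csTwo_eq_csMin]

theorem cleanA_eq' (item : List (String × String))
    (hc : (PySem.Dict.mk item).contains "question" = true) (hnd : (item.map Prod.fst).Nodup) :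
    pvCleanItemA item = ((PySem.Dict.mk item).insert "question" (pvCleanQB (pvQget item))).items := by
  rw [cleanA_eq item hc hnd, twostep_eq]

theorem main_eq (data : List (String × List (List (String × String))))
    (hpre : Pre_clean_questions data) :
    clean_questions data = clean_questions_alt data := by
  simp only [clean_questions, clean_questions_alt]
  rw [PySem.List.foldl_append_if]
  congr 1
  rw [List.filter_map, List.nil_append]
  rw [List.filter_congr (q := fun item => pvCleanQB (pvQget item) != "For") (by
    intro item hmem
    have h := hpre item hmem
    simp only [Function.comp]
    rw [cleanA_eq' item h.1 h.2, qget_insert])]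
  congr 1
  apply List.map_congr_left
  intro item hmem
  have h := hpre item (List.mem_of_mem_filter hmem)
  exact cleanA_eq' item h.1 h.2

-- ===== VERDICT (by name: the statement is the Claim_ definition above) =====
theorem clean_questions_spec : Claim_equal_clean_questions := by
  intro data _ hpre
  show clean_questions data = clean_questions_alt data
  exact main_eq data hpre
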